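-- pv_equiv track=rewrite | github.com/jordanbell2357/continued_fractions | prime_numbers.py | squarefull_and_squarefree_parts
-- ===== SOURCE A (Python) =====
-- import math
-- import itertools as it
-- from collections import Counter
-- from collections import abc
--
-- def isprime(n: int) -> bool:
--     n = abs(n)
--     if n % 2 == 0:
--         if n == 2:
--             return True
--         else:
--             return False
--     else:
--         for k in range(3, math.isqrt(n) + 1, 2):
--             if n % k == 0:
--                 return False
--         return True
--
-- def generate_primes() -> abc.Generator[int]:
--     yield 2
--     for k in it.count(start=3, step=2):
--         if isprime(k):
--             yield k
--
-- def make_prime_factor_counter(n: int) -> Counter: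
--     prime_gen = generate_primes()
--     prime_factor_counter = Counter()
--     for p in prime_gen:
--         if n in [0, 1]:
--             break
--         while n % p == 0:
--             prime_factor_counter.update([p])
--             n = n // p
--     return prime_factor_counter
--
-- def squarefull_and_squarefree_parts(d: int) -> tuple[int, int]:
--         prime_factor_counter_d = make_prime_factor_counter(d)
--         squarefull_part_d = 1
--         squarefree_part_d = 1
--         for p, k in prime_factor_counter_d.items():
--             squarefull_part_d *= p ** (k // 2 * 2)
--             squarefree_part_d *= p ** (k % 2)
--         return squarefull_part_d, squarefree_part_d
-- ===== SOURCE B (Python) =====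
-- def squarefull_and_squarefree_parts(d: int) -> tuple[int, int]:
--     # Direct trial division up to sqrt(n), reducing n as factors are found:
--     # no primality test per candidate, O(sqrt(d)) total.
--     n = d
--     full = 1
--     free = 1
--     p = 2
--     while p * p <= n:
--         if n % p == 0:
--             k = 0
--             while n % p == 0:
--                 n //= p
--                 k += 1
--             if k % 2:
--                 free *= p
--                 k -= 1
--             full *= p ** k
--         p = 3 if p == 2 else p + 2
--     if n > 1:
--         free *= n
--     return full, free
-- ===== Notes on version B (the rewrite author's own statement) =====
-- stated objective: faster
-- what changed: Replaces A's infinite prime generator (each prime certified by its own trial-division primality test) plus a Counter of exponents with a single trial-division loop over candidates 2,3,5,... up to sqrt of the shrinking n, accumulating the squarefull and squarefree parts on the fly; the prime cofactor left when p*p > n is folded into the squarefree part directly.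
import Mathlib
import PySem

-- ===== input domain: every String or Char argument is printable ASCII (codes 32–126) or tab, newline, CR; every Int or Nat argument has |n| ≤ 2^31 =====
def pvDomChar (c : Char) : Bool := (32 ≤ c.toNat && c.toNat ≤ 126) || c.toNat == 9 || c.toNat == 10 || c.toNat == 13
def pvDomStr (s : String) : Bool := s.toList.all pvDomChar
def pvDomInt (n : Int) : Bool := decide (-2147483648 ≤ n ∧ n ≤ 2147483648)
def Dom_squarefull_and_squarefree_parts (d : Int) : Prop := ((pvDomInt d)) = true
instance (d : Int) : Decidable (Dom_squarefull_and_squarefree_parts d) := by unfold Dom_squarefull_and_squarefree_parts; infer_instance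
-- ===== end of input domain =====

-- B replaces A's prime-generator-plus-Counter factorisation with one trial-division loop up to √n
-- (objective: faster; no per-candidate primality test).  Equivalence is proved for d ≥ 0 (Pre_);
-- for d < 0 the Python A loops forever, so nothing is claimed there.

-- ===== PORT A =====
-- helper: math.isqrt(n) for n ≥ 0 is Nat.sqrt (exact on the nonnegative ints it is applied to here)
-- isprime(n): early-return loop over range(3, isqrt(n)+1, 2) rendered as List.all (same result)
def isprimeA (n0 : Int) : Bool :=
  let n := |n0|
  if PySem.Int.mod n 2 == 0 then n == 2
  else (PySem.List.pyRange 3 (Int.ofNat n.toNat.sqrt + 1) 2).all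
        (fun k => !(PySem.Int.mod n k == 0))

-- inner 'while n % p == 0: prime_factor_counter.update([p]); n = n // p' (fuel-guarded; fuel n.toNat+1 suffices)
def pullA (fuel : Nat) (n p : Int) (cnt : PySem.Dict Int Int) : Int × PySem.Dict Int Int :=
  match fuel with
  | 0 => (n, cnt)
  | f + 1 =>
    if PySem.Int.mod n p == 0 then
      pullA f (PySem.Int.floordiv n p) p (cnt.modify p 0 (· + 1))
    else (n, cnt)

-- 'for p in generate_primes(): …' with the generator inlined: candidates 2,3,5,7,… and the
-- isprime filter (the generator yields 2 unconditionally); fuel-guarded (fuel n.toNat+2 suffices: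
-- once n reaches 1 further iterations leave the counter unchanged, as does running out of fuel)
def loopA (fuel : Nat) (cand n : Int) (cnt : PySem.Dict Int Int) : PySem.Dict Int Int :=
  match fuel with
  | 0 => cnt
  | f + 1 =>
    if cand == 2 || isprimeA cand then
      if n == 0 || n == 1 then cnt
      else
        let r := pullA (n.toNat + 1) n cand cnt
        loopA f (if cand == 2 then 3 else cand + 2) r.1 r.2
    else loopA f (if cand == 2 then 3 else cand + 2) n cnt

def make_prime_factor_counter (n : Int) : PySem.Dict Int Int :=
  loopA (n.toNat + 2) 2 n PySem.Dict.empty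

-- 'p ** e' with e ≥ 0 (all exponents in A are ≥ 0)
def squarefull_and_squarefree_parts (d : Int) : List Int :=
  let cnt := make_prime_factor_counter d
  let r := cnt.items.foldl
    (fun (acc : Int × Int) pk =>
      (acc.1 * pk.1 ^ (PySem.Int.floordiv pk.2 2 * 2).toNat,
       acc.2 * pk.1 ^ (PySem.Int.mod pk.2 2).toNat)) (1, 1)
  [r.1, r.2]

-- ===== PORT B =====
-- inner 'while n % p == 0: n //= p; k += 1' of Source B (fuel-guarded; fuel n.toNat+1 suffices)
def pullB (fuel : Nat) (n p k : Int) : Int × Int :=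
  match fuel with
  | 0 => (n, k)
  | f + 1 =>
    if PySem.Int.mod n p == 0 then pullB f (PySem.Int.floordiv n p) p (k + 1)
    else (n, k)

-- 'while p * p <= n: …' of Source B (fuel-guarded; fuel d.toNat+2 suffices)
def loopB (fuel : Nat) (p n full free : Int) : Int × Int :=
  match fuel with
  | 0 => (full, free)
  | f + 1 =>
    if p * p ≤ n then
      if PySem.Int.mod n p == 0 then
        let r := pullB (n.toNat + 1) n p 0
        let free' := if PySem.Int.mod r.2 2 == 1 then free * p else free
        let k' := if PySem.Int.mod r.2 2 == 1 then r.2 - 1 else r.2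
        loopB f (if p == 2 then 3 else p + 2) r.1 (full * p ^ k'.toNat) free'
      else loopB f (if p == 2 then 3 else p + 2) n full free
    else (full, if 1 < n then free * n else free)

def squarefull_and_squarefree_parts_alt (d : Int) : List Int :=
  let r := loopB (d.toNat + 2) 2 d 1 1
  [r.1, r.2]

-- ===== PRECONDITION & SPEC =====
-- Pre_ excludes d < 0: there the Python A never returns (its prime loop runs forever, since a
-- negative n is never reduced to 0 or 1).
def Pre_squarefull_and_squarefree_parts (d : Int) : Prop := 0 ≤ d
instance (d : Int) : Decidable (Pre_squarefull_and_squarefree_parts d) := by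
  unfold Pre_squarefull_and_squarefree_parts; infer_instance
def pvWitness_squarefull_and_squarefree_parts : Int := 12

def Spec_squarefull_and_squarefree_parts (d : Int) (out : List Int) : Prop :=
  out = squarefull_and_squarefree_parts_alt d
instance (d : Int) (out : List Int) : Decidable (Spec_squarefull_and_squarefree_parts d out) := by
  unfold Spec_squarefull_and_squarefree_parts; infer_instance

-- ===== CLAIM (what is proved, stated in full; the proofs are below) =====
def Claim_equal_squarefull_and_squarefree_parts : Prop :=
  ∀ (d : Int), Dom_squarefull_and_squarefree_parts d →
    Pre_squarefull_and_squarefree_parts d →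
    Spec_squarefull_and_squarefree_parts d (squarefull_and_squarefree_parts d)

-- ===== LEMMAS AND PROOFS =====

-- Nat-level reference factorisation: divide every candidate c = 2,3,4,… out of n maximally.
def maxPow (fuel q n : Nat) : Nat :=
  match fuel with
  | 0 => 0
  | f + 1 => if 2 ≤ q ∧ 0 < n ∧ q ∣ n then maxPow f q (n / q) + 1 else 0

def facs (fuel c n : Nat) : List (Nat × Nat) :=
  match fuel with
  | 0 => []
  | f + 1 =>
    if n ≤ 1 then []
    else if c ∣ n then
      let k := maxPow n c n
      (c, k) :: facs f (c + 1) (n / c ^ k)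
    else facs f (c + 1) n

def castPK (pk : Nat × Nat) : Int × Int := ((pk.1 : Int), (pk.2 : Int))

def fullPart (L : List (Nat × Nat)) : Nat := (L.map (fun pk => pk.1 ^ (pk.2 / 2 * 2))).prod
def freePart (L : List (Nat × Nat)) : Nat := (L.map (fun pk => pk.1 ^ (pk.2 % 2))).prod

theorem maxPow_spec (fuel q n : Nat) (hq : 2 ≤ q) (hn : 0 < n) (hf : n ≤ fuel) :
    q ^ maxPow fuel q n ∣ n ∧ ¬ q ∣ n / q ^ maxPow fuel q n := by
  induction fuel generalizing n with
  | zero => omega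
  | succ f ih =>
    rw [maxPow]
    by_cases hd : q ∣ n
    · simp only [hq, hn, hd, and_self, if_true]
      have hn2 : 0 < n / q := Nat.div_pos (Nat.le_of_dvd hn hd) (by omega)
      have hle : n / q ≤ f := by
        have := Nat.div_lt_self hn (by omega : 1 < q)
        omega
      obtain ⟨h1, h2⟩ := ih (n / q) hn2 hle
      constructor
      · rw [pow_succ, Nat.mul_comm]
        exact (Nat.dvd_div_iff_mul_dvd hd).mp h1
      · rwa [pow_succ, Nat.mul_comm, ← Nat.div_div_eq_div_mul]
    · simp [hd]

theorem maxPow_unique (fuel q n k : Nat) (hq : 2 ≤ q) (hn : 0 < n) (hf : n ≤ fuel)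
    (h1 : q ^ k ∣ n) (h2 : ¬ q ∣ n / q ^ k) : k = maxPow fuel q n := by
  obtain ⟨g1, g2⟩ := maxPow_spec fuel q n hq hn hf
  set j := maxPow fuel q n with hj
  rcases Nat.lt_trichotomy k j with h | h | h
  · exfalso; apply h2
    have : q ^ (k + 1) ∣ n := dvd_trans (pow_dvd_pow q (by omega)) g1
    rw [Nat.dvd_div_iff_mul_dvd h1, Nat.mul_comm, ← pow_succ']
    exact this
  · exact h
  · exfalso; apply g2
    have : q ^ (j + 1) ∣ n := dvd_trans (pow_dvd_pow q (by omega)) h1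
    rw [Nat.dvd_div_iff_mul_dvd g1, Nat.mul_comm, ← pow_succ']
    exact this

theorem facs_le_one (fuel c n : Nat) (h : n ≤ 1) : facs fuel c n = [] := by
  cases fuel <;> simp [facs, h]

theorem facs_skip (f c n : Nat) (h : ¬ c ∣ n) : facs (f + 1) c n = facs f (c + 1) n := by
  by_cases h1 : n ≤ 1
  · rw [facs_le_one _ _ _ h1, facs_le_one _ _ _ h1]
  · rw [facs]; simp [h1, h]

theorem facs_cons (F c m k : Nat) (hm : 2 ≤ m) (hd : c ∣ m) (hk : maxPow m c m = k) :
    facs (F + 1) c m = (c, k) :: facs F (c + 1) (m / c ^ k) := by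
  have h1 : ¬ m ≤ 1 := by omega
  simp only [facs, h1, if_false, hd, if_true, hk]



theorem pullB_spec (fuel m q : Nat) (k0 : Int) (hq : 2 ≤ q) (hm : 0 < m) (hf : m ≤ fuel) :
    ∃ k : Nat, pullB fuel (m : Int) (q : Int) k0 = ((↑(m / q ^ k) : Int), k0 + (k : Int)) ∧
      q ^ k ∣ m ∧ ¬ q ∣ m / q ^ k := by
  induction fuel generalizing m k0 with
  | zero => omega
  | succ f ih =>
    rw [pullB]
    simp only [PySem.Int.mod_natCast, PySem.Int.floordiv_natCast, beq_iff_eq, Nat.cast_eq_zero]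
    by_cases hd : q ∣ m
    · have h0 : m % q = 0 := Nat.mod_eq_zero_of_dvd hd
      simp only [h0, if_true]
      have hm2 : 0 < m / q := Nat.div_pos (Nat.le_of_dvd hm hd) (by omega)
      have hle : m / q ≤ f := by
        have := Nat.div_lt_self hm (by omega : 1 < q)
        omega
      obtain ⟨k, heq, h1, h2⟩ := ih (m / q) (k0 + 1) hm2 hle
      refine ⟨k + 1, ?_, ?_, ?_⟩
      · rw [heq, Prod.mk.injEq]
        refine ⟨?_, by push_cast; ring⟩
        congr 1
        rw [pow_succ, Nat.mul_comm, ← Nat.div_div_eq_div_mul]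
      · rw [pow_succ, Nat.mul_comm]
        exact (Nat.dvd_div_iff_mul_dvd hd).mp h1
      · rwa [pow_succ, Nat.mul_comm, ← Nat.div_div_eq_div_mul]
    · have h0 : ¬ m % q = 0 := fun h => hd (Nat.dvd_of_mod_eq_zero h)
      simp only [h0, if_false]
      exact ⟨0, by simp, by simp, fun h => hd (by simpa using h)⟩

theorem modify_fresh (I : List (Int × Int)) (q v : Int) (w : Int)
    (hI : ∀ p ∈ I, p.1 ≠ q) :
    (PySem.Dict.mk (I ++ [(q, v)])).modify q 0 (· + w) = PySem.Dict.mk (I ++ [(q, v + w)]) := by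
  have hfind : List.find? (fun p => p.1 == q) (I ++ [(q, v)]) = some (q, v) := by
    rw [List.find?_append]
    have : List.find? (fun p => p.1 == q) I = none := by
      rw [List.find?_eq_none]
      intro p hp
      simpa using hI p hp
    simp [this]
  have hcon : (PySem.Dict.mk (I ++ [(q, v)])).contains q = true := by
    simp only [PySem.Dict.contains, List.any_eq_true]
    exact ⟨(q, v), by simp, by simp⟩
  simp only [PySem.Dict.modify, PySem.Dict.getD, PySem.Dict.get?, PySem.Dict.insert, hcon,
    if_true, hfind, Option.map_some, Option.getD_some]
  congr 1
  rw [List.map_append]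
  congr 1
  · conv_rhs => rw [← List.map_id I]
    apply List.map_congr_left
    intro p hp
    simp [hI p hp]
  · simp

theorem pullA_go (fuel m q : Nat) (I : List (Int × Int)) (v : Int)
    (hq : 2 ≤ q) (hm : 0 < m) (hf : m ≤ fuel) (hI : ∀ p ∈ I, p.1 ≠ (q : Int)) :
    ∃ k : Nat, pullA fuel (m : Int) (q : Int) (PySem.Dict.mk (I ++ [((q : Int), v)])) =
      ((↑(m / q ^ k) : Int), PySem.Dict.mk (I ++ [((q : Int), v + (k : Int))])) ∧
      q ^ k ∣ m ∧ ¬ q ∣ m / q ^ k := by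
  induction fuel generalizing m v with
  | zero => omega
  | succ f ih =>
    rw [pullA]
    simp only [PySem.Int.mod_natCast, PySem.Int.floordiv_natCast, beq_iff_eq, Nat.cast_eq_zero]
    by_cases hd : q ∣ m
    · have h0 : m % q = 0 := Nat.mod_eq_zero_of_dvd hd
      simp only [h0, if_true]
      rw [modify_fresh I _ _ 1 hI]
      have hm2 : 0 < m / q := Nat.div_pos (Nat.le_of_dvd hm hd) (by omega)
      have hle : m / q ≤ f := by
        have := Nat.div_lt_self hm (by omega : 1 < q)
        omega
      obtain ⟨k, heq, h1, h2⟩ := ih (m / q) (v + 1) hm2 hle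
      refine ⟨k + 1, ?_, ?_, ?_⟩
      · have e1 : m / q / q ^ k = m / q ^ (k + 1) := by
          rw [pow_succ, Nat.mul_comm, ← Nat.div_div_eq_div_mul]
        have e2 : v + 1 + (k : Int) = v + ((k + 1 : Nat) : Int) := by push_cast; ring
        rw [heq, e1, e2]
      · rw [pow_succ, Nat.mul_comm]
        exact (Nat.dvd_div_iff_mul_dvd hd).mp h1
      · rwa [pow_succ, Nat.mul_comm, ← Nat.div_div_eq_div_mul]
    · have h0 : ¬ m % q = 0 := fun h => hd (Nat.dvd_of_mod_eq_zero h)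
      simp only [h0, if_false]
      exact ⟨0, by simp, by simp, fun h => hd (by simpa using h)⟩

theorem isprimeA_false (c : Nat) (h3 : 3 ≤ c) (hodd : c % 2 = 1)
    (h : isprimeA (c : Int) = false) : ∃ j, 2 ≤ j ∧ j < c ∧ j ∣ c := by
  have habs : |(c : Int)| = (c : Int) := abs_of_nonneg (by positivity)
  simp only [isprimeA, habs] at h
  have hmod : PySem.Int.mod (c : Int) 2 = ((c % 2 : Nat) : Int) := by
    exact_mod_cast PySem.Int.mod_natCast c 2
  rw [hmod, hodd] at h
  simp only [Nat.cast_one, beq_iff_eq, one_ne_zero, if_false, List.all_eq_false] at h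
  obtain ⟨x, hx, hpx⟩ := h
  rw [PySem.List.mem_pyRange_iff_of_pos (by omega)] at hx
  simp only [Bool.not_eq_true'] at hpx
  obtain ⟨hx3, hxlt, _⟩ := hx
  have hx0 : 0 ≤ x := by omega
  obtain ⟨j, rfl⟩ : ∃ j : Nat, x = (j : Int) := ⟨x.toNat, (Int.toNat_of_nonneg hx0).symm⟩
  have hj3 : 3 ≤ j := by exact_mod_cast hx3
  refine ⟨j, by omega, ?_, ?_⟩
  · have hsq : (j : Int) < Int.ofNat (((c:Int)).toNat.sqrt) + 1 := hxlt
    have : j ≤ c.sqrt := by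
      simp only [Int.toNat_natCast, Int.ofNat_eq_natCast] at hsq
      exact_mod_cast Int.lt_add_one_iff.mp hsq
    have := Nat.sqrt_lt_self (by omega : 1 < c)
    omega
  · have hpx' : PySem.Int.mod (c : Int) (j : Int) = 0 := by
      rcases Bool.eq_false_or_eq_true (PySem.Int.mod (c : Int) (j : Int) == 0) with hb | hb
      · simpa using hb
      · exact absurd hb hpx
    have : ((j : Int)) ∣ (c : Int) := (PySem.Int.mod_eq_zero_iff_dvd _ _).mp hpx'
    exact_mod_cast this

-- no divisor below c and c² > m forces m prime (in the "no proper divisor" sense)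
theorem no_small_div (c m : Nat) (hm : 2 ≤ m) (hcc : m < c * c)
    (hinv : ∀ j, 2 ≤ j → j < c → ¬ j ∣ m) : ∀ j, 2 ≤ j → j < m → ¬ j ∣ m := by
  intro j h2 hjm hd
  have hj' : m / j ∣ m := Nat.div_dvd_of_dvd hd
  have hjpos : 0 < j := by omega
  have hmul : j * (m / j) = m := Nat.mul_div_cancel' hd
  have h2' : 2 ≤ m / j := by
    by_contra h
    interval_cases h' : m / j <;> omega
  rcases Nat.lt_or_ge j c with h | h
  · exact hinv j h2 h hd
  · rcases Nat.lt_or_ge (m / j) c with h' | h'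
    · exact hinv (m / j) h2' h' hj'
    · nlinarith

theorem facs_prime (F c m : Nat) (hm : 2 ≤ m) (hc : 2 ≤ c) (hcm : c ≤ m)
    (hpr : ∀ j, 2 ≤ j → j < m → ¬ j ∣ m) (hF : m + 1 ≤ F + c) :
    facs F c m = [(m, 1)] := by
  induction F generalizing c with
  | zero => omega
  | succ F ih =>
    rcases Nat.lt_or_ge c m with h | h
    · rw [facs_skip _ _ _ (hpr c hc h)]
      exact ih (c + 1) (by omega) (by omega) (by omega)
    · have hcm' : c = m := by omega
      subst hcm'
      rw [facs]
      simp only [show ¬ c ≤ 1 by omega, if_false, dvd_refl, if_true]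
      have h1 : maxPow c c c = 1 := by
        refine (maxPow_unique c c c 1 hc (by omega) (le_refl c) (by simp) ?_).symm
        simp only [pow_one, Nat.div_self (by omega : 0 < c)]
        intro hd; have := Nat.le_of_dvd (by omega) hd; omega
      rw [h1]
      simp [facs_le_one, Nat.div_self (by omega : 0 < c)]

theorem loopA_one (fuel : Nat) : ∀ (c : Int) (D : PySem.Dict Int Int), loopA fuel c 1 D = D := by
  induction fuel with
  | zero => intro c D; rfl
  | succ f ih =>
    intro c D
    rw [loopA]
    by_cases h : (c == 2 || isprimeA c) = true
    · rw [if_pos h]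
      norm_num
    · rw [if_neg h]
      exact ih _ _


theorem modify_fresh0 (I : List (Int × Int)) (q : Int)
    (hI : ∀ p ∈ I, p.1 ≠ q) :
    (PySem.Dict.mk I).modify q 0 (· + 1) = PySem.Dict.mk (I ++ [(q, 1)]) := by
  have hfind : List.find? (fun p => p.1 == q) I = none := by
    rw [List.find?_eq_none]
    intro p hp
    simpa using hI p hp
  have hcon : (PySem.Dict.mk I).contains q = false := by
    simp only [PySem.Dict.contains, List.any_eq_false]
    intro p hp
    simpa using hI p hp
  simp [PySem.Dict.modify, PySem.Dict.getD, PySem.Dict.get?, PySem.Dict.insert, hcon, hfind]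

theorem inv_le (c m : Nat) (hm : 2 ≤ m) (hinv : ∀ j, 2 ≤ j → j < c → ¬ j ∣ m) : c ≤ m := by
  by_contra h
  exact hinv m hm (by omega) dvd_rfl

theorem even_not_dvd (e m : Nat) (he : e % 2 = 0) (hm : m % 2 = 1) : ¬ e ∣ m := by
  intro h
  have : 2 ∣ m := dvd_trans (Nat.dvd_of_mod_eq_zero he) h
  omega

theorem dvd_step (c m k : Nat) (hc : 2 ≤ c) (hd : c ∣ m)
    (h1 : c ^ k ∣ m / c) (h2 : ¬ c ∣ m / c / c ^ k) :
    m / c / c ^ k = m / c ^ (k + 1) ∧ c ^ (k + 1) ∣ m ∧ ¬ c ∣ m / c ^ (k + 1) := by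
  have e1 : m / c / c ^ k = m / c ^ (k + 1) := by
    rw [pow_succ, Nat.mul_comm, ← Nat.div_div_eq_div_mul]
  refine ⟨e1, ?_, by rwa [← e1]⟩
  rw [pow_succ, Nat.mul_comm]
  exact (Nat.dvd_div_iff_mul_dvd hd).mp h1

theorem loopA_odd (fuel : Nat) : ∀ (c m : Nat) (I : List (Int × Int)),
    3 ≤ c → c % 2 = 1 → m % 2 = 1 →
    (∀ j, 2 ≤ j → j < c → ¬ j ∣ m) →
    (∀ p ∈ I, p.1 < (c : Int)) →
    m + 1 ≤ 2 * fuel + c →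
    ∀ F, m + 1 ≤ F + c →
      (loopA fuel (c : Int) (m : Int) (PySem.Dict.mk I)).items =
        I ++ (facs F c m).map castPK := by
  induction fuel with
  | zero =>
    intro c m I hc _ hmodd hinv _ hfuel F hF
    have hm1 : m = 1 := by
      by_contra h
      exact hinv m (by omega) (by omega) dvd_rfl
    subst hm1
    rw [facs_le_one _ _ _ (by omega)]
    simp [loopA]
  | succ f ih =>
    intro c m I hc hcodd hmodd hinv hkeys hfuel F hF
    by_cases hm1 : m = 1
    · subst hm1
      rw [facs_le_one _ _ _ (by omega)]
      simp only [Nat.cast_one]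
      rw [loopA_one]
      simp
    have hm2 : 2 ≤ m := by omega
    have hmc : c ≤ m := inv_le c m hm2 hinv
    have hc2 : ((c : Int) == 2) = false := by
      simp only [beq_eq_false_iff_ne, ne_eq]
      intro h
      have : c = 2 := by exact_mod_cast h
      omega
    have hnext : (if ((c : Int) == 2) = true then (3:Int) else (c : Int) + 2) = ((c + 2 : Nat) : Int) := by
      rw [hc2]
      push_cast
      norm_num
    have hkeys' : ∀ p ∈ I, p.1 < ((c + 2 : Nat) : Int) := by
      intro p hp
      have := hkeys p hp
      push_cast
      omega
    cases hp : isprimeA (c : Int) with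
    | false =>
      rw [loopA]
      rw [if_neg (by simp [hc2, hp])]
      rw [hnext]
      obtain ⟨j, hj2, hjc, hjdvd⟩ := isprimeA_false c hc hcodd hp
      have hcd : ¬ c ∣ m := fun h => hinv j hj2 hjc (dvd_trans hjdvd h)
      have hed : ¬ (c + 1) ∣ m := even_not_dvd _ _ (by omega) hmodd
      have hcltm : c < m := by
        rcases Nat.lt_or_ge c m with h | h
        · exact h
        · exact absurd (show c = m by omega) (fun hh => hcd (hh ▸ dvd_rfl))
      obtain ⟨F', rfl⟩ : ∃ F', F = F' + 2 := ⟨F - 2, by omega⟩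
      rw [facs_skip _ _ _ hcd, facs_skip _ _ _ hed]
      refine ih (c + 2) m I (by omega) (by omega) hmodd ?_ hkeys' (by omega) F' (by omega)
      intro j' h2 hlt hdv
      rcases Nat.lt_or_ge j' c with h | h
      · exact hinv j' h2 h hdv
      · rcases Nat.eq_or_lt_of_le h with h' | h'
        · exact hcd (h' ▸ hdv)
        · have : j' = c + 1 := by omega
          exact hed (this ▸ hdv)
    | true =>
      rw [loopA]
      rw [if_pos (by simp [hp])]
      rw [if_neg (by simp; omega)]
      simp only [Int.toNat_natCast, hnext]
      by_cases hd : c ∣ m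
      · -- divide out c
        rw [pullA]
        rw [if_pos (by
          have : PySem.Int.mod (m : Int) (c : Int) = ((m % c : Nat) : Int) := by
            exact_mod_cast PySem.Int.mod_natCast m c
          simp [this, Nat.mod_eq_zero_of_dvd hd])]
        rw [modify_fresh0 I _ (fun p hp => ne_of_lt (hkeys p hp))]
        have hfl : PySem.Int.floordiv (m : Int) (c : Int) = ((m / c : Nat) : Int) := by
          exact_mod_cast PySem.Int.floordiv_natCast m c
        rw [hfl]
        have hmcpos : 0 < m / c := Nat.div_pos (Nat.le_of_dvd (by omega) hd) (by omega)
        obtain ⟨k, heq, h1, h2⟩ := pullA_go m (m / c) c I 1 (by omega) hmcpos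
          (le_of_lt (Nat.div_lt_self (by omega) (by omega))) (fun p hp => ne_of_lt (hkeys p hp))
        rw [heq]
        obtain ⟨e1, hK1, hK2⟩ := dvd_step c m k (by omega) hd h1 h2
        rw [e1]
        set m' := m / c ^ (k + 1) with hm'def
        have hm'pos : 0 < m' := Nat.div_pos (Nat.le_of_dvd (by omega) hK1) (by positivity)
        have hm'dvd : m' ∣ m := by
          obtain ⟨t, ht⟩ := hK1
          have hmt : m' = t := by
            rw [hm'def, ht, Nat.mul_div_cancel_left t (by positivity)]
          exact ⟨c ^ (k + 1), by rw [hmt, ht, Nat.mul_comm]⟩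
        have hm'odd : m' % 2 = 1 := by
          rcases Nat.mod_two_eq_zero_or_one m' with h | h
          · exfalso
            exact even_not_dvd m' m h hmodd hm'dvd
          · exact h
        have hm'lt : m' < m := by
          apply Nat.div_lt_self (by omega)
          calc 1 < c := by omega
            _ ≤ c ^ (k + 1) := Nat.le_self_pow (by omega) c
        have hinv' : ∀ j', 2 ≤ j' → j' < c + 2 → ¬ j' ∣ m' := by
          intro j' h2' hlt hdv
          rcases Nat.lt_or_ge j' c with h | h
          · exact hinv j' h2' h (dvd_trans hdv hm'dvd)
          · rcases Nat.eq_or_lt_of_le h with h' | h'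
            · exact hK2 (h' ▸ hdv)
            · have : j' = c + 1 := by omega
              exact even_not_dvd j' m' (by omega) hm'odd (this ▸ hdv)
        -- facs side
        obtain ⟨F', rfl⟩ : ∃ F', F = F' + 1 := ⟨F - 1, by omega⟩
        conv_rhs => rw [facs]
        rw [if_neg (by omega), if_pos hd]
        have hKmax : maxPow m c m = k + 1 :=
          (maxPow_unique m c m (k + 1) (by omega) (by omega) le_rfl hK1 hK2).symm
        simp only [hKmax, ← hm'def]
        have hkeys'' : ∀ p ∈ I ++ [((c : Int), ((k+1 : Nat) : Int))], p.1 < ((c + 2 : Nat) : Int) := by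
          intro p hp
          rcases List.mem_append.mp hp with h | h
          · exact hkeys' p h
          · simp only [List.mem_singleton] at h
            subst h
            push_cast
            omega
        by_cases hm'1 : m' = 1
        · rw [hm'1]
          have : ((1 : Nat) : Int) = (1 : Int) := by norm_num
          rw [this, loopA_one]
          rw [facs_le_one _ _ _ (by omega)]
          simp only [List.map_cons, List.map_nil, castPK]
          simp
          omega
        · have hm'2 : 2 ≤ m' := by omega
          have hm'c : c + 2 ≤ m' := inv_le (c + 2) m' hm'2 hinv'
          obtain ⟨F'', rfl⟩ : ∃ F'', F' = F'' + 1 := ⟨F' - 1, by omega⟩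
          rw [facs_skip _ _ _ (even_not_dvd (c + 1) m' (by omega) hm'odd)]
          have hrec := ih (c + 2) m' (I ++ [((c : Int), ((k+1 : Nat) : Int))]) (by omega) (by omega)
            hm'odd hinv' hkeys'' (by omega) F'' (by omega)
          rw [show (1 : Int) + ((k : Nat) : Int) = ((k + 1 : Nat) : Int) by push_cast; ring]
          rw [hrec]
          simp [castPK]
      · -- c does not divide m
        rw [pullA]
        rw [if_neg (by
          have : PySem.Int.mod (m : Int) (c : Int) = ((m % c : Nat) : Int) := by
            exact_mod_cast PySem.Int.mod_natCast m c
          simp only [this, beq_iff_eq, Nat.cast_eq_zero]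
          intro h
          exact hd (Nat.dvd_of_mod_eq_zero h))]
        have hed : ¬ (c + 1) ∣ m := even_not_dvd _ _ (by omega) hmodd
        have hcltm : c < m := by
          rcases Nat.lt_or_ge c m with h | h
          · exact h
          · exact absurd (show c = m by omega) (fun hh => hd (hh ▸ dvd_rfl))
        obtain ⟨F', rfl⟩ : ∃ F', F = F' + 2 := ⟨F - 2, by omega⟩
        rw [facs_skip _ _ _ hd, facs_skip _ _ _ hed]
        refine ih (c + 2) m I (by omega) (by omega) hmodd ?_ hkeys' (by omega) F' (by omega)
        intro j' h2 hlt hdv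
        rcases Nat.lt_or_ge j' c with h | h
        · exact hinv j' h2 h hdv
        · rcases Nat.eq_or_lt_of_le h with h' | h'
          · exact hd (h' ▸ hdv)
          · have : j' = c + 1 := by omega
            exact hed (this ▸ hdv)

theorem loopB_odd (fuel : Nat) : ∀ (c m fu fr : Nat),
    3 ≤ c → c % 2 = 1 → m % 2 = 1 →
    (∀ j, 2 ≤ j → j < c → ¬ j ∣ m) →
    m + 1 ≤ 2 * fuel + c →
    ∀ F, m + 1 ≤ F + c →
      loopB fuel (c : Int) (m : Int) (fu : Int) (fr : Int) =
        ((↑(fu * fullPart (facs F c m)) : Int), (↑(fr * freePart (facs F c m)) : Int)) := by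
  induction fuel with
  | zero =>
    intro c m fu fr _ _ hmodd hinv hfuel F hF
    have hm1 : m = 1 := by
      by_contra h
      exact hinv m (by omega) (by omega) dvd_rfl
    subst hm1
    rw [facs_le_one _ _ _ (by omega)]
    simp [loopB, fullPart, freePart]
  | succ f ih =>
    intro c m fu fr hc hcodd hmodd hinv hfuel F hF
    have hc2 : ((c : Int) == 2) = false := by
      simp only [beq_eq_false_iff_ne, ne_eq]
      intro h
      have : c = 2 := by exact_mod_cast h
      omega
    have hnext : (if ((c : Int) == 2) = true then (3:Int) else (c : Int) + 2) = ((c + 2 : Nat) : Int) := by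
      rw [hc2]
      push_cast
      norm_num
    by_cases hcc : c * c ≤ m
    · have hm2 : 2 ≤ m := by nlinarith
      have h3c : 3 * c ≤ m := by nlinarith
      rw [loopB]
      rw [if_pos (by exact_mod_cast hcc : ((c : Int)) * (c : Int) ≤ (m : Int))]
      by_cases hd : c ∣ m
      · rw [if_pos (by
          have : PySem.Int.mod (m : Int) (c : Int) = ((m % c : Nat) : Int) := by
            exact_mod_cast PySem.Int.mod_natCast m c
          simp [this, Nat.mod_eq_zero_of_dvd hd])]
        simp only [Int.toNat_natCast, hnext]
        obtain ⟨k, heq, h1, h2⟩ := pullB_spec (m + 1) m c 0 (by omega) (by omega) (by omega)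
        simp only [heq, zero_add]
        have hk1 : 1 ≤ k := by
          by_contra h
          have : k = 0 := by omega
          rw [this] at h2
          simp at h2
          exact h2 hd
        have hm'pos : 0 < m / c ^ k := Nat.div_pos (Nat.le_of_dvd (by omega) h1) (by positivity)
        have hm'dvd : m / c ^ k ∣ m := by
          obtain ⟨t, ht⟩ := h1
          have hmt : m / c ^ k = t := by
            rw [ht, Nat.mul_div_cancel_left t (by positivity)]
          exact ⟨c ^ k, by rw [hmt, ht, Nat.mul_comm]⟩
        have hm'odd : m / c ^ k % 2 = 1 := by
          rcases Nat.mod_two_eq_zero_or_one (m / c ^ k) with h | h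
          · exact absurd hm'dvd (even_not_dvd _ m h hmodd)
          · exact h
        have hm'lt : m / c ^ k < m := by
          apply Nat.div_lt_self (by omega)
          calc 1 < c := by omega
            _ ≤ c ^ k := Nat.le_self_pow (by omega) c
        have hinv' : ∀ j', 2 ≤ j' → j' < c + 2 → ¬ j' ∣ m / c ^ k := by
          intro j' h2' hlt hdv
          rcases Nat.lt_or_ge j' c with h | h
          · exact hinv j' h2' h (dvd_trans hdv hm'dvd)
          · rcases Nat.eq_or_lt_of_le h with h' | h'
            · exact h2 (h' ▸ hdv)
            · have : j' = c + 1 := by omega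
              exact even_not_dvd j' _ (by omega) hm'odd (this ▸ hdv)
        obtain ⟨F', rfl⟩ : ∃ F', F = F' + 2 := ⟨F - 2, by omega⟩
        have hKmax : maxPow m c m = k :=
          (maxPow_unique m c m k (by omega) (by omega) le_rfl h1 h2).symm
        rw [facs_cons (F' + 1) c m k (by omega) hd hKmax]
        rw [facs_skip _ _ _ (even_not_dvd (c + 1) (m / c ^ k) (by omega) hm'odd)]
        have hmodk : PySem.Int.mod ((k : Nat) : Int) 2 = ((k % 2 : Nat) : Int) := by
          exact_mod_cast PySem.Int.mod_natCast k 2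
        rw [hmodk]
        have hrec := fun fu' fr' => ih (c + 2) (m / c ^ k) fu' fr' (by omega) (by omega)
          hm'odd hinv' (by omega) F' (by omega)
        simp only [fullPart, freePart, List.map_cons, List.prod_cons] at hrec ⊢
        rcases Nat.mod_two_eq_zero_or_one k with hk | hk <;> rw [hk]
        · rw [if_neg (by norm_num), if_neg (by norm_num), Int.toNat_natCast]
          have e5 : (fu : Int) * (c : Int) ^ k = ((fu * c ^ (k / 2 * 2) : Nat) : Int) := by
            have : k / 2 * 2 = k := by omega
            rw [this]
            push_cast
            ring
          rw [e5, hrec]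
          rw [show c + 1 + 1 = c + 2 from by omega]
          simp [Nat.mul_assoc]
        · rw [if_pos (by norm_num), if_pos (by norm_num)]
          have e4 : (((k : Nat) : Int) - 1).toNat = k / 2 * 2 := by omega
          rw [e4]
          have e5 : (fu : Int) * (c : Int) ^ (k / 2 * 2) = ((fu * c ^ (k / 2 * 2) : Nat) : Int) := by
            push_cast
            ring
          have e6 : (fr : Int) * (c : Int) = ((fr * c ^ (k % 2) : Nat) : Int) := by
            rw [hk]
            push_cast
            ring
          rw [e5, e6, hrec]
          rw [show c + 1 + 1 = c + 2 from by omega]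
          simp [hk, Nat.mul_assoc]
      · rw [if_neg (by
          have : PySem.Int.mod (m : Int) (c : Int) = ((m % c : Nat) : Int) := by
            exact_mod_cast PySem.Int.mod_natCast m c
          simp only [this, beq_iff_eq, Nat.cast_eq_zero]
          intro h
          exact hd (Nat.dvd_of_mod_eq_zero h))]
        rw [hnext]
        have hed : ¬ (c + 1) ∣ m := even_not_dvd _ _ (by omega) hmodd
        obtain ⟨F', rfl⟩ : ∃ F', F = F' + 2 := ⟨F - 2, by omega⟩
        rw [facs_skip _ _ _ hd, facs_skip _ _ _ hed]
        refine ih (c + 2) m fu fr (by omega) (by omega) hmodd ?_ (by omega) F' (by omega)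
        intro j' h2 hlt hdv
        rcases Nat.lt_or_ge j' c with h | h
        · exact hinv j' h2 h hdv
        · rcases Nat.eq_or_lt_of_le h with h' | h'
          · exact hd (h' ▸ hdv)
          · have : j' = c + 1 := by omega
            exact hed (this ▸ hdv)
    · rw [loopB]
      rw [if_neg (by
        intro h
        exact hcc (by exact_mod_cast h))]
      by_cases hm1 : m = 1
      · subst hm1
        rw [facs_le_one _ _ _ (by omega)]
        norm_num [fullPart, freePart]
      · have hm2 : 2 ≤ m := by omega
        have hprm := no_small_div c m hm2 (by omega) hinv
        rw [facs_prime F c m hm2 (by omega) (inv_le c m hm2 hinv) hprm (by omega)]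
        rw [if_pos (by exact_mod_cast hm2 : (1 : Int) < (m : Int))]
        simp only [fullPart, freePart, List.map_cons, List.map_nil, List.prod_cons,
          List.prod_nil]
        norm_num

theorem odd_of_not_two_dvd (m : Nat) (h : ¬ 2 ∣ m) : m % 2 = 1 := by
  rcases Nat.mod_two_eq_zero_or_one m with h' | h'
  · exact absurd (Nat.dvd_of_mod_eq_zero h') h
  · exact h'

theorem counter_items (m : Nat) :
    (make_prime_factor_counter (m : Int)).items = (facs (m + 1) 2 m).map castPK := by
  unfold make_prime_factor_counter
  rw [Int.toNat_natCast]
  by_cases h0 : m = 0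
  · subst h0
    rfl
  by_cases h1 : m = 1
  · subst h1
    rfl
  have hm2 : 2 ≤ m := by omega
  rw [loopA]
  rw [if_pos (by simp)]
  rw [if_neg (by
    simp only [Bool.or_eq_true, beq_iff_eq, Nat.cast_eq_zero, Nat.cast_eq_one]
    push_neg
    omega)]
  simp only [Int.toNat_natCast]
  rw [show (if ((2:Int) == 2) = true then (3:Int) else 2 + 2) = ((3:Nat) : Int) from by norm_num]
  by_cases hd : 2 ∣ m
  · rw [pullA]
    rw [if_pos (by
      have : PySem.Int.mod (m : Int) (2 : Int) = ((m % 2 : Nat) : Int) := by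
        exact_mod_cast PySem.Int.mod_natCast m 2
      rw [this, Nat.mod_eq_zero_of_dvd hd]
      norm_num)]
    rw [show (PySem.Dict.empty : PySem.Dict Int Int) = PySem.Dict.mk [] from rfl]
    rw [modify_fresh0 [] 2 (by simp)]
    have hfl : PySem.Int.floordiv (m : Int) (2 : Int) = ((m / 2 : Nat) : Int) := by
      exact_mod_cast PySem.Int.floordiv_natCast m 2
    rw [hfl]
    have hmcpos : 0 < m / 2 := Nat.div_pos (by omega) (by omega)
    obtain ⟨k, heq, h1', h2'⟩ := pullA_go m (m / 2) 2 [] 1 (by omega) hmcpos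
      (by omega) (by simp)
    simp only [Nat.cast_ofNat, Nat.cast_add, Nat.cast_one] at heq
    rw [heq]
    obtain ⟨e1, hK1, hK2⟩ := dvd_step 2 m k (by omega) hd h1' h2'
    rw [e1]
    have hm'pos : 0 < m / 2 ^ (k + 1) := Nat.div_pos (Nat.le_of_dvd (by omega) hK1) (by positivity)
    have hm'odd : m / 2 ^ (k + 1) % 2 = 1 := odd_of_not_two_dvd _ hK2
    have hm'lt : m / 2 ^ (k + 1) < m := by
      apply Nat.div_lt_self (by omega)
      calc 1 < 2 := by omega
        _ ≤ 2 ^ (k + 1) := Nat.le_self_pow (by omega) 2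
    have hKmax : maxPow m 2 m = k + 1 :=
      (maxPow_unique m 2 m (k + 1) (by omega) (by omega) le_rfl hK1 hK2).symm
    rw [facs_cons m 2 m (k + 1) (by omega) hd hKmax]
    have hrec := loopA_odd (m + 1) 3 (m / 2 ^ (k + 1)) [(((2 : Int)), ((k + 1 : Nat) : Int))]
      (by omega) (by omega) hm'odd
      (by
        intro j hj2 hj3 hdv
        have : j = 2 := by omega
        exact hK2 (this ▸ hdv))
      (by
        intro p hp
        simp only [List.mem_singleton] at hp
        subst hp
        norm_num)
      (by omega) m (by omega)
    rw [show (1 : Int) + ((k : Nat) : Int) = ((k + 1 : Nat) : Int) from by push_cast; ring]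
    simp only [List.nil_append]
    rw [hrec]
    simp [castPK]
  · rw [pullA]
    rw [if_neg (by
      have : PySem.Int.mod (m : Int) (2 : Int) = ((m % 2 : Nat) : Int) := by
        exact_mod_cast PySem.Int.mod_natCast m 2
      simp only [this, beq_iff_eq, Nat.cast_eq_zero]
      intro h
      exact hd (Nat.dvd_of_mod_eq_zero h))]
    have hmodd : m % 2 = 1 := odd_of_not_two_dvd m hd
    rw [show (PySem.Dict.empty : PySem.Dict Int Int) = PySem.Dict.mk [] from rfl]
    have hrec := loopA_odd (m + 1) 3 m [] (by omega) (by omega) hmodd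
      (by
        intro j hj2 hj3 hdv
        have : j = 2 := by omega
        exact hd (this ▸ hdv))
      (by simp) (by omega) m (by omega)
    rw [hrec]
    rw [facs_skip _ _ _ hd]
    simp

theorem fold_items_go (L : List (Nat × Nat)) : ∀ (a b : Nat),
    (L.map castPK).foldl
      (fun (acc : Int × Int) pk =>
        (acc.1 * pk.1 ^ (PySem.Int.floordiv pk.2 2 * 2).toNat,
         acc.2 * pk.1 ^ (PySem.Int.mod pk.2 2).toNat)) ((a : Int), (b : Int)) =
      ((↑(a * fullPart L) : Int), (↑(b * freePart L) : Int)) := by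
  induction L with
  | nil => intro a b; simp [fullPart, freePart]
  | cons pk L ih =>
    intro a b
    obtain ⟨p, k⟩ := pk
    simp only [List.map_cons, List.foldl_cons, castPK]
    have e1 : PySem.Int.floordiv (k : Int) 2 = ((k / 2 : Nat) : Int) := by
      exact_mod_cast PySem.Int.floordiv_natCast k 2
    have e2 : PySem.Int.mod (k : Int) 2 = ((k % 2 : Nat) : Int) := by
      exact_mod_cast PySem.Int.mod_natCast k 2
    rw [e1, e2]
    have e3 : (((k / 2 : Nat) : Int) * 2).toNat = k / 2 * 2 := by
      push_cast
      omega
    have e4 : (((k % 2 : Nat) : Int)).toNat = k % 2 := Int.toNat_natCast _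
    rw [e3, e4]
    have e5 : ((a : Int)) * (p : Int) ^ (k / 2 * 2) = ((a * p ^ (k / 2 * 2) : Nat) : Int) := by
      push_cast; ring
    have e6 : ((b : Int)) * (p : Int) ^ (k % 2) = ((b * p ^ (k % 2) : Nat) : Int) := by
      push_cast; ring
    rw [e5, e6, ih]
    congr 2
    · simp only [fullPart, List.map_cons, List.prod_cons]
      ring
    · simp only [freePart, List.map_cons, List.prod_cons]
      ring

theorem fold_items (L : List (Nat × Nat)) :
    (L.map castPK).foldl
      (fun (acc : Int × Int) pk =>
        (acc.1 * pk.1 ^ (PySem.Int.floordiv pk.2 2 * 2).toNat,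
         acc.2 * pk.1 ^ (PySem.Int.mod pk.2 2).toNat)) (1, 1) =
      ((fullPart L : Int), (freePart L : Int)) := by
  have := fold_items_go L 1 1
  simpa using this

theorem loopB_glue (m : Nat) :
    loopB (m + 2) 2 (m : Int) 1 1 =
      ((fullPart (facs (m + 1) 2 m) : Int), (freePart (facs (m + 1) 2 m) : Int)) := by
  by_cases h4 : m < 4
  · interval_cases m <;> decide
  have hm4 : 4 ≤ m := by omega
  rw [loopB]
  rw [if_pos (by
    show (2 : Int) * 2 ≤ (m : Int)
    exact_mod_cast (by omega : 4 ≤ m))]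
  rw [show (if ((2:Int) == 2) = true then (3:Int) else 2 + 2) = ((3:Nat) : Int) from by norm_num]
  by_cases hd : 2 ∣ m
  · rw [if_pos (by
      have : PySem.Int.mod (m : Int) (2 : Int) = ((m % 2 : Nat) : Int) := by
        exact_mod_cast PySem.Int.mod_natCast m 2
      rw [this, Nat.mod_eq_zero_of_dvd hd]
      norm_num)]
    simp only [Int.toNat_natCast]
    obtain ⟨k, heq, h1, h2⟩ := pullB_spec (m + 1) m 2 0 (by omega) (by omega) (by omega)
    rw [show ((2 : Nat) : Int) = (2 : Int) from by norm_num] at heq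
    simp only [heq, zero_add]
    have hk1 : 1 ≤ k := by
      by_contra h
      have hk0 : k = 0 := by omega
      rw [hk0, pow_zero, Nat.div_one] at h2
      exact h2 hd
    have hm'pos : 0 < m / 2 ^ k := Nat.div_pos (Nat.le_of_dvd (by omega) h1) (by positivity)
    have hm'odd : m / 2 ^ k % 2 = 1 := odd_of_not_two_dvd _ h2
    have hm'lt : m / 2 ^ k < m := by
      apply Nat.div_lt_self (by omega)
      calc 1 < 2 := by omega
        _ ≤ 2 ^ k := Nat.le_self_pow (by omega) 2
    have hKmax : maxPow m 2 m = k :=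
      (maxPow_unique m 2 m k (by omega) (by omega) le_rfl h1 h2).symm
    rw [facs_cons m 2 m k (by omega) hd hKmax]
    have hinv' : ∀ j, 2 ≤ j → j < 3 → ¬ j ∣ m / 2 ^ k := by
      intro j hj2 hj3 hdv
      have : j = 2 := by omega
      exact h2 (this ▸ hdv)
    have hmodk : PySem.Int.mod ((k : Nat) : Int) 2 = ((k % 2 : Nat) : Int) := by
      exact_mod_cast PySem.Int.mod_natCast k 2
    rw [hmodk]
    have hrec := fun fu' fr' => loopB_odd (m + 1) 3 (m / 2 ^ k) fu' fr' (by omega) (by omega)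
      hm'odd hinv' (by omega) m (by omega)
    simp only [fullPart, freePart, List.map_cons, List.prod_cons] at hrec ⊢
    rcases Nat.mod_two_eq_zero_or_one k with hk | hk <;> rw [hk]
    · rw [if_neg (by norm_num), if_neg (by norm_num), Int.toNat_natCast]
      have e5 : (1 : Int) * (2 : Int) ^ k = (((2 ^ (k / 2 * 2) : Nat)) : Int) := by
        have : k / 2 * 2 = k := by omega
        rw [this]
        push_cast
        ring
      rw [e5, show (1 : Int) = ((1 : Nat) : Int) from by norm_num, hrec]
      rw [show (2 + 1 : Nat) = 3 from by norm_num]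
      simp [hk, Nat.mul_assoc]
    · rw [if_pos (by norm_num), if_pos (by norm_num)]
      have e4 : (((k : Nat) : Int) - 1).toNat = k / 2 * 2 := by omega
      rw [e4]
      have e5 : (1 : Int) * (2 : Int) ^ (k / 2 * 2) = (((2 ^ (k / 2 * 2) : Nat)) : Int) := by
        push_cast
        ring
      have e6 : (1 : Int) * (2 : Int) = (((2 ^ (k % 2) : Nat)) : Int) := by
        rw [hk]
        norm_num
      rw [e5, e6, hrec]
      rw [show (2 + 1 : Nat) = 3 from by norm_num, hk]
  · rw [if_neg (by
      have : PySem.Int.mod (m : Int) (2 : Int) = ((m % 2 : Nat) : Int) := by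
        exact_mod_cast PySem.Int.mod_natCast m 2
      simp only [this, beq_iff_eq, Nat.cast_eq_zero]
      intro h
      exact hd (Nat.dvd_of_mod_eq_zero h))]
    have hmodd : m % 2 = 1 := odd_of_not_two_dvd m hd
    have hrec := loopB_odd (m + 1) 3 m 1 1 (by omega) (by omega) hmodd
      (by
        intro j hj2 hj3 hdv
        have : j = 2 := by omega
        exact hd (this ▸ hdv))
      (by omega) m (by omega)
    rw [show (1 : Int) = ((1 : Nat) : Int) from by norm_num, hrec]
    rw [facs_skip _ _ _ hd]
    simp

-- ===== VERDICT (by name: the statement is the Claim_ definition above) =====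
theorem squarefull_and_squarefree_parts_spec : Claim_equal_squarefull_and_squarefree_parts := by
  intro d _ hpre
  unfold Spec_squarefull_and_squarefree_parts
  obtain ⟨m, rfl⟩ : ∃ m : Nat, d = (m : Int) := ⟨d.toNat, (Int.toNat_of_nonneg hpre).symm⟩
  show squarefull_and_squarefree_parts (m : Int) = squarefull_and_squarefree_parts_alt (m : Int)
  simp only [squarefull_and_squarefree_parts, squarefull_and_squarefree_parts_alt,
    Int.toNat_natCast]
  rw [counter_items, fold_items, loopB_glue]
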